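-- pv_equiv track=rewrite | github.com/drhobbes/AoC2023 | day3.py | make_digit_dict
-- ===== SOURCE A (Python) =====
-- def make_digit_dict(line, linenum):
--     i = 0
--     numbers = []
--     while i < len(line):
--         while i < len(line) and not line[i].isdigit(): # find the next number
--             i += 1
--         if i < len(line):
--             # we found a number
--             number = {"start": i}
--             while i < len(line) and line[i].isdigit():
--                 i += 1
--             number["end"] = i
--             number["value"] = int(line[number["start"]:number["end"]])
--             number["row"] = linenum
--             numbers.append(number)
--     return numbers
-- ===== SOURCE B (Python) =====
-- from itertools import groupby
--
-- def make_digit_dict(line, linenum):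
--     numbers = []
--     pos = 0
--     for isnum, group in groupby(line, key=str.isdigit):
--         chars = list(group)
--         if isnum:
--             numbers.append({"start": pos,
--                             "end": pos + len(chars),
--                             "value": int("".join(chars)),
--                             "row": linenum})
--         pos += len(chars)
--     return numbers
-- ===== Notes on version B (the rewrite author's own statement) =====
-- stated objective: idiomatic
-- what changed: Replaced the nested index-scanning while-loops with an itertools.groupby pass over runs of digit/non-digit characters and a running position counter.
import Mathlib
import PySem

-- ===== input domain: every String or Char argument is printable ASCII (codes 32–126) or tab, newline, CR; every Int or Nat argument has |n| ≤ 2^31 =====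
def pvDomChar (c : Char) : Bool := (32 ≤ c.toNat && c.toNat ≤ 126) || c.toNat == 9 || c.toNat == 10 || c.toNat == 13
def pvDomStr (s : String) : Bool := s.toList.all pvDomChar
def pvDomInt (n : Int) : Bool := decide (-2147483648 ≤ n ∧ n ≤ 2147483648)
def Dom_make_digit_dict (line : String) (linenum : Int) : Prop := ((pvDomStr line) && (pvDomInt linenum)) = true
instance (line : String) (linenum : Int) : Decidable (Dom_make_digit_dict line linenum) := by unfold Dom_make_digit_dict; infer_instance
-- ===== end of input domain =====

-- B replaces A's nested index-scanning while-loops by a groupby-style pass over runs of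
-- digit/non-digit characters with a running position counter (objective: idiomatic).

-- head of a dropWhile fails the predicate (termination of the port below cites this)
theorem mdd_dropWhile_head_false (p : Char → Bool) (l : List Char) (r : Char) (rs : List Char)
    (h : l.dropWhile p = r :: rs) : p r = false := by
  induction l with
  | nil => simp at h
  | cons a l ih =>
    rw [List.dropWhile_cons] at h
    by_cases ha : p a = true
    · rw [if_pos ha] at h; exact ih h
    · rw [if_neg ha] at h
      cases h; simpa using ha

-- ===== PORT A =====
-- A's outer while-loop over the index i, walking the suffix of the line that starts at i.
-- The inner skip loop 'while not line[i].isdigit(): i += 1' is the dropWhile (its per-char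
-- increments sum to the takeWhile length added to i); the digit loop is the takeWhile; the
-- slice line[start:end] is exactly the digit run collected by that takeWhile.
-- int(...) never raises here (the run is a nonempty ASCII digit string), so .getD 0 is unreachable.
def mddGoA (cs : List Char) (i : Int) (ln : Int) : List (List (String × Int)) :=
  match h : cs.dropWhile (fun c => !PySem.Chars.isdigit c) with
  | [] => []
  | r :: rs =>
    [("start", i + ((cs.takeWhile (fun c => !PySem.Chars.isdigit c)).length : Int)),
     ("end", i + ((cs.takeWhile (fun c => !PySem.Chars.isdigit c)).length : Int)
               + (((r :: rs).takeWhile (fun c => PySem.Chars.isdigit c)).length : Int)),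
     ("value", (PySem.Int.ofStr? (String.mk ((r :: rs).takeWhile (fun c => PySem.Chars.isdigit c)))).getD 0),
     ("row", ln)] ::
    mddGoA ((r :: rs).dropWhile (fun c => PySem.Chars.isdigit c))
      (i + ((cs.takeWhile (fun c => !PySem.Chars.isdigit c)).length : Int)
         + (((r :: rs).takeWhile (fun c => PySem.Chars.isdigit c)).length : Int)) ln
termination_by cs.length
decreasing_by
  have hr : (!PySem.Chars.isdigit r) = false :=
    mdd_dropWhile_head_false _ cs r rs h
  have hr' : PySem.Chars.isdigit r = true := by simpa using hr
  have h1 : (cs.dropWhile (fun c => !PySem.Chars.isdigit c)).length ≤ cs.length :=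
    List.length_dropWhile_le _ _
  have h2 : ((r :: rs).dropWhile (fun c => PySem.Chars.isdigit c)).length ≤ rs.length := by
    rw [List.dropWhile_cons_of_pos hr']
    exact List.length_dropWhile_le _ _
  rw [h] at h1
  simp only [List.length_cons] at h1
  omega

-- ===== PORT B =====
-- itertools.groupby(line, key=str.isdigit): the list of maximal runs, each tagged with its key.
def mddGroups (cs : List Char) : List (Bool × List Char) :=
  match cs with
  | [] => []
  | c :: rest =>
    (PySem.Chars.isdigit c,
     c :: rest.takeWhile (fun d => PySem.Chars.isdigit d == PySem.Chars.isdigit c)) ::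
    mddGroups (rest.dropWhile (fun d => PySem.Chars.isdigit d == PySem.Chars.isdigit c))
termination_by cs.length
decreasing_by
  have := List.length_dropWhile_le
    (fun d => PySem.Chars.isdigit d == PySem.Chars.isdigit c) rest
  simp only [List.length_cons]
  omega

-- B's for-loop over the groups, carrying the running position counter pos.
def mddGoB (gs : List (Bool × List Char)) (pos : Int) (ln : Int) : List (List (String × Int)) :=
  match gs with
  | [] => []
  | (k, g) :: gs' =>
    if k then
      [("start", pos), ("end", pos + (g.length : Int)),
       ("value", (PySem.Int.ofStr? (String.mk g)).getD 0),
       ("row", ln)] :: mddGoB gs' (pos + (g.length : Int)) ln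
    else
      mddGoB gs' (pos + (g.length : Int)) ln

def make_digit_dict (line : String) (linenum : Int) : List (List (String × Int)) :=
  mddGoA line.toList 0 linenum

def make_digit_dict_alt (line : String) (linenum : Int) : List (List (String × Int)) :=
  mddGoB (mddGroups line.toList) 0 linenum

-- ===== PRECONDITION & SPEC =====
def Spec_make_digit_dict (line : String) (linenum : Int) (out : List (List (String × Int))) : Prop := out = make_digit_dict_alt line linenum
instance (line : String) (linenum : Int) (out : List (List (String × Int))) : Decidable (Spec_make_digit_dict line linenum out) := by unfold Spec_make_digit_dict; infer_instance

-- ===== CLAIM (what is proved, stated in full; the proofs are below) =====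
def Claim_equal_make_digit_dict : Prop := ∀ (line : String) (linenum : Int), Dom_make_digit_dict line linenum → Spec_make_digit_dict line linenum (make_digit_dict line linenum)

-- ===== LEMMAS AND PROOFS =====

theorem mdd_key_true : (fun d => PySem.Chars.isdigit d == true) = (fun d => PySem.Chars.isdigit d) := by
  funext d; cases h : PySem.Chars.isdigit d <;> simp

theorem mdd_key_false : (fun d => PySem.Chars.isdigit d == false) = (fun d => !PySem.Chars.isdigit d) := by
  funext d; cases h : PySem.Chars.isdigit d <;> simp

-- unfolding equations for mddGoA in terms of the shape of the dropWhile
theorem mddGoA_nil_of (cs : List Char) (i ln : Int)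
    (h : cs.dropWhile (fun c => !PySem.Chars.isdigit c) = []) : mddGoA cs i ln = [] := by
  rw [mddGoA]
  split
  · rfl
  · rename_i r rs h'; rw [h] at h'; cases h'

theorem mddGoA_cons_of (cs : List Char) (i ln : Int) (r : Char) (rs : List Char)
    (h : cs.dropWhile (fun c => !PySem.Chars.isdigit c) = r :: rs) :
    mddGoA cs i ln =
    [("start", i + ((cs.takeWhile (fun c => !PySem.Chars.isdigit c)).length : Int)),
     ("end", i + ((cs.takeWhile (fun c => !PySem.Chars.isdigit c)).length : Int)
               + (((r :: rs).takeWhile (fun c => PySem.Chars.isdigit c)).length : Int)),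
     ("value", (PySem.Int.ofStr? (String.mk ((r :: rs).takeWhile (fun c => PySem.Chars.isdigit c)))).getD 0),
     ("row", ln)] ::
    mddGoA ((r :: rs).dropWhile (fun c => PySem.Chars.isdigit c))
      (i + ((cs.takeWhile (fun c => !PySem.Chars.isdigit c)).length : Int)
         + (((r :: rs).takeWhile (fun c => PySem.Chars.isdigit c)).length : Int)) ln := by
  rw [mddGoA]
  split
  · rename_i h'; rw [h] at h'; cases h'
  · rename_i r' rs' h'
    rw [h] at h'
    cases h'
    rfl

-- Skipping the whole leading non-digit run at once does not change A's result.
theorem mddGoA_skip (cs : List Char) (i ln : Int) :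
    mddGoA cs i ln
      = mddGoA (cs.dropWhile (fun c => !PySem.Chars.isdigit c))
          (i + ((cs.takeWhile (fun c => !PySem.Chars.isdigit c)).length : Int)) ln := by
  cases h : cs.dropWhile (fun c => !PySem.Chars.isdigit c) with
  | nil =>
    rw [mddGoA_nil_of cs i ln h, mddGoA_nil_of _ _ _ rfl]
  | cons r rs =>
    have hr := mdd_dropWhile_head_false _ cs r rs h
    rw [mddGoA_cons_of cs i ln r rs h,
        mddGoA_cons_of (r :: rs) _ ln r rs (List.dropWhile_cons_of_neg (by simp [hr]))]
    rw [List.takeWhile_cons_of_neg (p := fun c => !PySem.Chars.isdigit c) (by simp [hr])]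
    simp

theorem mdd_goB_eq_goA (n : Nat) : ∀ (cs : List Char), cs.length ≤ n → ∀ (i ln : Int),
    mddGoA cs i ln = mddGoB (mddGroups cs) i ln := by
  induction n with
  | zero =>
    intro cs hlen i ln
    have : cs = [] := List.length_eq_zero_iff.mp (Nat.le_zero.mp hlen)
    subst this
    rw [mddGoA_nil_of _ _ _ rfl, mddGroups]; rfl
  | succ n ih =>
    intro cs hlen i ln
    cases cs with
    | nil => rw [mddGoA_nil_of _ _ _ rfl, mddGroups]; rfl
    | cons c rest =>
      simp only [List.length_cons] at hlen
      rw [mddGroups]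
      by_cases hd : PySem.Chars.isdigit c = true
      · -- a digit run at the front of the line
        rw [hd, mdd_key_true]
        have hA : (c :: rest).dropWhile (fun c => !PySem.Chars.isdigit c) = c :: rest :=
          List.dropWhile_cons_of_neg (by simp [hd])
        rw [mddGoA_cons_of (c :: rest) i ln c rest hA]
        rw [List.takeWhile_cons_of_neg (p := fun c => !PySem.Chars.isdigit c) (by simp [hd]),
            List.takeWhile_cons_of_pos (p := fun c => PySem.Chars.isdigit c) hd,
            List.dropWhile_cons_of_pos (p := fun c => PySem.Chars.isdigit c) hd]
        rw [mddGoB]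
        simp only [if_pos]
        have hrec : (rest.dropWhile (fun c => PySem.Chars.isdigit c)).length ≤ n := by
          have := List.length_dropWhile_le (fun c => PySem.Chars.isdigit c) rest
          omega
        rw [ih _ hrec]
        simp
      · -- a non-digit run at the front of the line
        have hd' : PySem.Chars.isdigit c = false := by simpa using hd
        rw [hd', mdd_key_false]
        rw [mddGoA_skip (c :: rest) i ln]
        rw [List.dropWhile_cons_of_pos (p := fun c => !PySem.Chars.isdigit c) (by simp [hd']),
            List.takeWhile_cons_of_pos (p := fun c => !PySem.Chars.isdigit c) (by simp [hd'])]
        rw [mddGoB]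
        simp only [Bool.false_eq_true, if_false]
        have hrec : (rest.dropWhile (fun c => !PySem.Chars.isdigit c)).length ≤ n := by
          have := List.length_dropWhile_le (fun c => !PySem.Chars.isdigit c) rest
          omega
        rw [ih _ hrec]

-- ===== VERDICT (by name: the statement is the Claim_ definition above) =====
theorem make_digit_dict_spec : Claim_equal_make_digit_dict := by
  intro line linenum _
  unfold Spec_make_digit_dict make_digit_dict make_digit_dict_alt
  exact mdd_goB_eq_goA line.toList.length line.toList le_rfl 0 linenum
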